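-- pv_equiv track=rewrite | github.com/revanofabiansyah/react-test-case | algoritma-test-revano/1_reverse_string.py | reverse_alpha_chars
-- ===== SOURCE A (Python) =====
-- def reverse_alpha_chars(string):
--     result = ''
--     alpha_chars = ''
--
--     for char in string:
--         if char.isalpha():
--             alpha_chars += char
--
--     reversed_alpha_chars = alpha_chars[::-1]
--
--     alpha_index = 0
--     for char in string:
--         if char.isalpha():
--             if char.islower():
--                 result += reversed_alpha_chars[alpha_index].lower()
--             else:
--                 result += reversed_alpha_chars[alpha_index].upper()
--             alpha_index += 1
--         else:
--             result += char
--
--     return result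
-- ===== SOURCE B (Python) =====
-- def reverse_alpha_chars(string):
--     # In-place two-pointer swap over a char list: walk l and r inward, skip
--     # non-alpha positions, and swap each outer pair of letters re-cased to the
--     # destination slot's original case; one join at the end.
--     chars = list(string)
--     l, r = 0, len(chars) - 1
--     while l < r:
--         if not chars[l].isalpha():
--             l += 1
--         elif not chars[r].isalpha():
--             r -= 1
--         else:
--             a, b = chars[l], chars[r]
--             chars[l] = b.lower() if a.islower() else b.upper()
--             chars[r] = a.lower() if b.islower() else a.upper()
--             l += 1
--             r -= 1
--     return ''.join(chars)
-- ===== Notes on version B (the rewrite author's own statement) =====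
-- stated objective: alternative
-- what changed: Instead of A's two staged passes (collect the alpha chars, reverse that string, then rebuild the result indexing it with a counter), B mutates a char list in place with two pointers moving inward, swapping each outer pair of letters re-cased to the destination slot's case; no collected alpha string, no reversal, no index counter.
import Mathlib
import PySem

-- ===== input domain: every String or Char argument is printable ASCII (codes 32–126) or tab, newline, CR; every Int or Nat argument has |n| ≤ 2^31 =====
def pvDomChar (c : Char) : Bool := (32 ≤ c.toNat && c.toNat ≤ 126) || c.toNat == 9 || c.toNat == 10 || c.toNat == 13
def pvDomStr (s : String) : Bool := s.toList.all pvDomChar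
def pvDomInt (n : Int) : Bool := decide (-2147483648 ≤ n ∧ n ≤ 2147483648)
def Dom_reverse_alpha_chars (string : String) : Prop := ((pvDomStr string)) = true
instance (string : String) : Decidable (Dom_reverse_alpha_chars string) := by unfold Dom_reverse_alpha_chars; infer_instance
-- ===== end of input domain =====

-- B replaces A's staged passes (collect alphas, reverse, rebuild with an index
-- counter) by an in-place two-pointer swap over a char list (objective:
-- alternative decomposition, same O(n) letter work).

-- ===== PORT A =====
-- transliteration of A: collect alpha chars, reverse via [::-1], second pass
-- indexes the reversed sequence with a running counter (strings as List Char).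
def reverse_alpha_chars (string : String) : String :=
  let alpha_chars : List Char :=
    string.toList.foldl (fun acc c => if PySem.Chars.isalpha c then acc ++ [c] else acc) []
  let reversed_alpha_chars : List Char :=
    (PySem.List.slice? alpha_chars none none (-1)).getD []
  let st :=
    string.toList.foldl
      (fun (st : List Char × Nat) c =>
        if PySem.Chars.isalpha c then
          match PySem.List.pyGet? reversed_alpha_chars (st.2 : Int) with
          | some rc =>
              (st.1 ++ [if PySem.Chars.islower c then PySem.Chars.lowerChar rc
                        else PySem.Chars.upperChar rc], st.2 + 1)
          | none => (st.1, st.2 + 1)   -- unreachable: Python would raise IndexError here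
        else (st.1 ++ [c], st.2))
      (([] : List Char), (0 : Nat))
  String.ofList st.1

-- ===== PORT B =====
-- src re-cased to the case dst originally had (b.lower() if a.islower() else b.upper())
def pvRecase (src dst : Char) : Char :=
  if PySem.Chars.islower dst then PySem.Chars.lowerChar src else PySem.Chars.upperChar src

-- the while-loop: l,r move inward over the char list, swapping alpha pairs in place
def revAlphaLoop (cs : List Char) (l r : Nat) : List Char :=
  if h : l < r then
    match cs[l]? with
    | none => cs   -- unreachable: l < r ≤ len-1 keeps both indices in range
    | some a =>
      if !PySem.Chars.isalpha a then revAlphaLoop cs (l + 1) r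
      else
        match cs[r]? with
        | none => cs   -- unreachable, as above
        | some b =>
          if !PySem.Chars.isalpha b then revAlphaLoop cs l (r - 1)
          else revAlphaLoop ((cs.set l (pvRecase b a)).set r (pvRecase a b)) (l + 1) (r - 1)
  else cs
termination_by r - l
decreasing_by all_goals omega

-- Python's r = len(chars) - 1 is -1 on the empty string; Nat-sub's 0 skips the loop identically
def reverse_alpha_chars_alt (string : String) : String :=
  String.ofList (revAlphaLoop string.toList 0 (string.toList.length - 1))

-- ===== PRECONDITION & SPEC =====
def Spec_reverse_alpha_chars (string : String) (out : String) : Prop := out = reverse_alpha_chars_alt string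
instance (string : String) (out : String) : Decidable (Spec_reverse_alpha_chars string out) := by unfold Spec_reverse_alpha_chars; infer_instance

-- ===== CLAIM (what is proved, stated in full; the proofs are below) =====
def Claim_equal_reverse_alpha_chars : Prop := ∀ (string : String), Dom_reverse_alpha_chars string → Spec_reverse_alpha_chars string (reverse_alpha_chars string)

-- ===== LEMMAS AND PROOFS =====

-- reference function: substitute the letters of rs for the alpha positions of xs, re-cased
def revAlphaGo : List Char → List Char → List Char
  | [], _ => []
  | c :: cs, als =>
    if PySem.Chars.isalpha c then
      match als with
      | a :: as => pvRecase a c :: revAlphaGo cs as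
      | [] => c :: revAlphaGo cs []
    else c :: revAlphaGo cs als

def alphaCnt (xs : List Char) : Nat := (xs.filter (fun c => PySem.Chars.isalpha c)).length

theorem alphaCnt_nil : alphaCnt [] = 0 := rfl

theorem alphaCnt_cons (c : Char) (cs : List Char) :
    alphaCnt (c :: cs) = (if PySem.Chars.isalpha c then 1 else 0) + alphaCnt cs := by
  simp [alphaCnt, List.filter_cons]
  split <;> simp [Nat.add_comm]

-- revAlphaGo over an append: the second part consumes what the first left over
theorem revAlphaGo_append (ys zs rs : List Char) :
    revAlphaGo (ys ++ zs) rs = revAlphaGo ys rs ++ revAlphaGo zs (rs.drop (alphaCnt ys)) := by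
  induction ys generalizing rs with
  | nil => simp [revAlphaGo, alphaCnt_nil]
  | cons c cs ih =>
    by_cases h : PySem.Chars.isalpha c = true
    · cases rs with
      | nil => simp [revAlphaGo, h, ih, alphaCnt_cons]
      | cons a as =>
        simp [revAlphaGo, h, ih, alphaCnt_cons]
        rw [Nat.add_comm, List.drop_succ_cons]
    · simp [revAlphaGo, h, ih, alphaCnt_cons]

-- revAlphaGo only looks at the first alphaCnt ys elements of its letter list
theorem revAlphaGo_irrel (ys rs ts : List Char) (h : alphaCnt ys ≤ rs.length) :
    revAlphaGo ys (rs ++ ts) = revAlphaGo ys rs := by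
  induction ys generalizing rs with
  | nil => simp [revAlphaGo]
  | cons c cs ih =>
    by_cases ha : PySem.Chars.isalpha c = true
    · cases rs with
      | nil => simp [alphaCnt_cons, ha] at h
      | cons a as =>
        simp only [alphaCnt_cons, ha, if_pos, List.length_cons] at h
        simp [revAlphaGo, ha, List.cons_append, ih as (by omega)]
    · simp only [alphaCnt_cons, ha] at h
      simp [revAlphaGo, ha, ih rs (by omega)]

-- an ASCII letter re-cased to its own case is itself
theorem pvRecase_self (c : Char) (h : PySem.Chars.isalpha c = true) : pvRecase c c = c := by
  simp only [PySem.Chars.isalpha, Bool.or_eq_true] at h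
  simp only [pvRecase, PySem.Chars.islower, PySem.Chars.isupper, PySem.Chars.lowerChar,
    PySem.Chars.upperChar, Char.le_def, UInt32.le_iff_toNat_le] at *
  rcases h with h | h <;> simp_all <;> intros <;> exfalso <;> omega

-- the target of both programs, on the list side
def alphaRev (mid : List Char) : List Char :=
  revAlphaGo mid ((mid.filter (fun c => PySem.Chars.isalpha c)).reverse)

theorem get_mid (pre zs : List Char) (z : Char) : (pre ++ z :: zs)[pre.length]? = some z := by
  induction pre with
  | nil => rfl
  | cons p ps ih => simpa using ih

theorem set_mid (pre zs : List Char) (z x : Char) :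
    (pre ++ z :: zs).set pre.length x = pre ++ x :: zs := by
  induction pre with
  | nil => rfl
  | cons p ps ih => simpa using ih

theorem alphaRev_cons_notalpha (c : Char) (cs : List Char) (h : ¬ PySem.Chars.isalpha c = true) :
    alphaRev (c :: cs) = c :: alphaRev cs := by
  simp [alphaRev, List.filter_cons, h, revAlphaGo]

theorem alphaRev_append_notalpha (cs : List Char) (d : Char) (h : ¬ PySem.Chars.isalpha d = true) :
    alphaRev (cs ++ [d]) = alphaRev cs ++ [d] := by
  simp only [alphaRev, List.filter_append, List.filter_cons, h, List.filter_nil]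
  rw [revAlphaGo_append]
  simp [revAlphaGo, h]

theorem alphaRev_pair (c d : Char) (ys : List Char)
    (hc : PySem.Chars.isalpha c = true) (hd : PySem.Chars.isalpha d = true) :
    alphaRev (c :: ys ++ [d]) = pvRecase d c :: alphaRev ys ++ [pvRecase c d] := by
  have hfil : (c :: (ys ++ [d])).filter (fun c => PySem.Chars.isalpha c)
      = c :: ((ys.filter (fun c => PySem.Chars.isalpha c)) ++ [d]) := by
    simp [List.filter_append, hc, hd]
  have hR : (ys.filter (fun c => PySem.Chars.isalpha c)).reverse.length = alphaCnt ys := by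
    simp [alphaCnt]
  unfold alphaRev
  rw [List.cons_append, hfil]
  rw [show (c :: ((ys.filter (fun c => PySem.Chars.isalpha c)) ++ [d])).reverse
      = d :: ((ys.filter (fun c => PySem.Chars.isalpha c)).reverse ++ [c]) from by simp]
  rw [show revAlphaGo (c :: (ys ++ [d]))
        (d :: ((ys.filter (fun c => PySem.Chars.isalpha c)).reverse ++ [c]))
      = pvRecase d c :: revAlphaGo (ys ++ [d])
        ((ys.filter (fun c => PySem.Chars.isalpha c)).reverse ++ [c]) from by
    simp [revAlphaGo, hc]]
  rw [revAlphaGo_append ys [d], revAlphaGo_irrel ys _ [c] (by omega), ← hR, List.drop_left]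
  simp [revAlphaGo, hd]

theorem alphaRev_single (c : Char) : alphaRev [c] = [c] := by
  by_cases h : PySem.Chars.isalpha c = true
  · simp [alphaRev, List.filter_cons, h, revAlphaGo, pvRecase_self c h]
  · simp [alphaRev, List.filter_cons, h, revAlphaGo]

-- MAIN LOOP INVARIANT: with l,r framing mid inside pre ++ mid ++ suf, the
-- two-pointer loop rewrites exactly mid to alphaRev mid
theorem loop_eq (n : Nat) : ∀ (mid : List Char), mid.length = n → ∀ (pre suf : List Char),
    revAlphaLoop (pre ++ mid ++ suf) pre.length (pre.length + mid.length - 1)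
      = pre ++ alphaRev mid ++ suf := by
  induction n using Nat.strong_induction_on with
  | _ n ih =>
    intro mid hn pre suf
    match mid with
    | [] =>
      rw [revAlphaLoop, dif_neg (by simp only [List.length_nil]; omega)]
      simp [alphaRev, revAlphaGo]
    | [c] =>
      rw [revAlphaLoop, dif_neg (by simp only [List.length_cons, List.length_nil]; omega)]
      simp [alphaRev_single]
    | c :: c' :: rest =>
      obtain ⟨ys, d, hyd⟩ : ∃ ys d, c' :: rest = ys ++ [d] :=
        ⟨(c' :: rest).dropLast, (c' :: rest).getLast (by simp),
          (List.dropLast_append_getLast (by simp)).symm⟩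
      rw [hyd] at hn ⊢
      have hys : ys.length + 2 = n := by simpa using hn
      have hr : pre.length + (c :: (ys ++ [d])).length - 1
          = pre.length + 1 + ys.length := by simp <;> omega
      have hlr : pre.length < pre.length + 1 + ys.length := by omega
      clear hn
      have hshape : pre ++ (c :: (ys ++ [d])) ++ suf = pre ++ c :: (ys ++ d :: suf) := by
        simp
      have hgetl : (pre ++ (c :: (ys ++ [d])) ++ suf)[pre.length]? = some c := by
        rw [hshape]; exact get_mid pre _ c
      have hshape2 : pre ++ (c :: (ys ++ [d])) ++ suf = (pre ++ c :: ys) ++ d :: suf := by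
        simp
      have hgetr : (pre ++ (c :: (ys ++ [d])) ++ suf)[pre.length + 1 + ys.length]? = some d := by
        rw [hshape2]
        have : pre.length + 1 + ys.length = (pre ++ c :: ys).length := by simp <;> omega
        rw [this]; exact get_mid _ _ d
      rw [hr, revAlphaLoop, dif_pos hlr, hgetl]
      by_cases hc : PySem.Chars.isalpha c = true
      · simp only [hc, Bool.not_true, Bool.false_eq_true, if_false, hgetr]
        by_cases hd : PySem.Chars.isalpha d = true
        · simp only [hd, Bool.not_true, Bool.false_eq_true, if_false]
          have hset : ((pre ++ (c :: (ys ++ [d])) ++ suf).set pre.length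
                (pvRecase d c)).set (pre.length + 1 + ys.length) (pvRecase c d)
              = (pre ++ [pvRecase d c]) ++ ys ++ (pvRecase c d :: suf) := by
            rw [hshape, set_mid pre _ c (pvRecase d c)]
            have h1 : pre ++ pvRecase d c :: (ys ++ d :: suf)
                = (pre ++ pvRecase d c :: ys) ++ d :: suf := by simp
            have h2 : pre.length + 1 + ys.length = (pre ++ pvRecase d c :: ys).length := by
              simp <;> omega
            rw [h1, h2, set_mid _ _ d (pvRecase c d)]
            simp
          rw [hset]
          have hpre1 : pre.length + 1 = (pre ++ [pvRecase d c]).length := by simp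
          rw [hpre1, ih ys.length (by omega) ys rfl _ _,
            ← List.cons_append, alphaRev_pair c d ys hc hd]
          simp
        · simp only [hd, Bool.not_eq_eq_eq_not, Bool.not_true, if_pos]
          have hshape3 : pre ++ (c :: (ys ++ [d])) ++ suf
              = pre ++ (c :: ys) ++ (d :: suf) := by simp
          have hr2 : pre.length + 1 + ys.length - 1
              = pre.length + (c :: ys).length - 1 := by simp <;> omega
          rw [hshape3, hr2, ih (c :: ys).length (by simp <;> omega) (c :: ys) rfl pre (d :: suf)]
          have h3 : alphaRev (c :: ys ++ [d]) = alphaRev (c :: ys) ++ [d] := by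
            simpa using alphaRev_append_notalpha (c :: ys) d (by simp [hd])
          simp only [List.cons_append] at h3
          rw [h3]
          simp
      · simp only [hc, Bool.not_eq_eq_eq_not, Bool.not_true, if_pos]
        have hshape4 : pre ++ (c :: (ys ++ [d])) ++ suf
            = (pre ++ [c]) ++ (ys ++ [d]) ++ suf := by simp
        have hpre2 : pre.length + 1 = (pre ++ [c]).length := by simp
        rw [hshape4, hpre2]
        rw [show (pre ++ [c]).length + ys.length
            = (pre ++ [c]).length + (ys ++ [d]).length - 1 from by simp <;> omega]
        rw [ih (ys ++ [d]).length (by simp <;> omega) (ys ++ [d]) rfl _ _]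
        rw [alphaRev_cons_notalpha c _ (by simp [hc])]
        simp

-- A's second loop computes revAlphaGo applied to the reversed letters
theorem foldA_eq (xs rev res : List Char) (i : Nat)
    (h : i + alphaCnt xs ≤ rev.length) :
    xs.foldl
      (fun (st : List Char × Nat) c =>
        if PySem.Chars.isalpha c then
          match PySem.List.pyGet? rev (st.2 : Int) with
          | some rc =>
              (st.1 ++ [if PySem.Chars.islower c then PySem.Chars.lowerChar rc
                        else PySem.Chars.upperChar rc], st.2 + 1)
          | none => (st.1, st.2 + 1)
        else (st.1 ++ [c], st.2))
      (res, i)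
    = (res ++ revAlphaGo xs (rev.drop i), i + alphaCnt xs) := by
  induction xs generalizing res i with
  | nil => simp [revAlphaGo, alphaCnt_nil]
  | cons c cs ih =>
    by_cases ha : PySem.Chars.isalpha c = true
    · simp only [alphaCnt_cons, ha, if_pos] at h
      have hi : i < rev.length := by omega
      have hget : PySem.List.pyGet? rev (i : Int) = some rev[i] := by
        simp [PySem.List.pyGet?_natCast, List.getElem?_eq_getElem hi]
      have hdrop : rev.drop i = rev[i] :: rev.drop (i + 1) :=
        List.drop_eq_getElem_cons hi
      simp only [List.foldl_cons, ha, if_pos, hget]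
      rw [ih _ (i + 1) (by omega), hdrop]
      simp only [revAlphaGo, ha, if_pos, alphaCnt_cons, List.append_assoc,
        List.singleton_append, Prod.mk.injEq, pvRecase]
      exact ⟨trivial, by omega⟩
    · simp only [List.foldl_cons, ha, if_neg, Bool.false_eq_true, not_false_iff]
      rw [ih _ i (by simpa [alphaCnt_cons, ha] using h)]
      simp [revAlphaGo, ha, alphaCnt_cons]

-- ===== VERDICT (by name: the statement is the Claim_ definition above) =====
theorem reverse_alpha_chars_spec : Claim_equal_reverse_alpha_chars := by
  intro s _
  unfold Spec_reverse_alpha_chars reverse_alpha_chars reverse_alpha_chars_alt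
  have hfilter :
      s.toList.foldl (fun acc c => if PySem.Chars.isalpha c then acc ++ [c] else acc)
        ([] : List Char)
      = s.toList.filter (fun c => PySem.Chars.isalpha c) := by
    simpa using PySem.List.foldl_append_if_eq_filter
      (l := s.toList) (p := fun c => PySem.Chars.isalpha c) (acc := [])
  simp only [hfilter, PySem.List.slice?_none_none_neg_one, Option.getD_some]
  rw [foldA_eq _ _ _ 0 (by simp [alphaCnt])]
  have hB : revAlphaLoop s.toList 0 (s.toList.length - 1)
      = alphaRev s.toList := by
    have := loop_eq s.toList.length s.toList rfl [] []
    simpa using this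
  have hlen : s.toList.length = s.length := by simp
  rw [hlen] at hB
  simp [hB, alphaRev]
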